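-- pv_equiv track=rewrite | github.com/LawrenceSeeto/MATH3411 | q2.py | assign_codewords
-- ===== SOURCE A (Python) =====
-- def assign_codewords(lengths):
--     """
--     Assign codewords to symbols using the canonical prefix code method.
--
--     Parameters:
--     - lengths: A list of tuples where each tuple contains (symbol_index, codeword_length)
--
--     Returns:
--     - codewords: A dictionary mapping symbol indices to their assigned codewords
--     """
--     # Step 1: Sort the symbols based on their codeword lengths
--     sorted_lengths = sorted(lengths, key=lambda x: x[1])
--
--     codewords = {}
--     C = 0  # Codeword counter
--     l_prev = 0  # Previous codeword length
--
--     # Step 2: Assign codewords to each symbol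
--     for symbol_index, l_i in sorted_lengths:
--         if l_i > l_prev:
--             # Shift C left by the difference in lengths
--             C = C << (l_i - l_prev)
--         # Format the codeword with leading zeros to match the codeword length
--         codeword = format(C, '0{}b'.format(l_i))
--         codewords[symbol_index] = codeword
--         # Increment the codeword counter
--         C += 1
--         # Update the previous length
--         l_prev = l_i
--
--     return codewords
-- ===== SOURCE B (Python) =====
-- def assign_codewords(lengths):
--     """Canonical prefix codes, stateless: each codeword's integer value is a
--     closed-form function of the multiset of lengths and the symbol's sorted
--     position, instead of a running shift-and-increment counter."""
--     codewords = {}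
--     for i, (symbol_index, l) in enumerate(sorted(lengths, key=lambda x: x[1])):
--         value = sum(1 << (l - m) for _, m in lengths if m < l) \
--                 + i - sum(1 for _, m in lengths if m < l)
--         codewords[symbol_index] = format(value, '0{}b'.format(l))
--     return codewords
-- ===== Notes on version B (the rewrite author's own statement) =====
-- stated objective: alternative
-- what changed: B drops A's stateful scan entirely: instead of threading a shift-and-increment counter through the sorted symbols, it computes each symbol's codeword value independently by a closed-form formula (sum of 2^(l-m) over all strictly shorter lengths, plus the symbol's rank among equal lengths taken from its enumerate index), so no counter or previous-length state is carried between iterations.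
import Mathlib
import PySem

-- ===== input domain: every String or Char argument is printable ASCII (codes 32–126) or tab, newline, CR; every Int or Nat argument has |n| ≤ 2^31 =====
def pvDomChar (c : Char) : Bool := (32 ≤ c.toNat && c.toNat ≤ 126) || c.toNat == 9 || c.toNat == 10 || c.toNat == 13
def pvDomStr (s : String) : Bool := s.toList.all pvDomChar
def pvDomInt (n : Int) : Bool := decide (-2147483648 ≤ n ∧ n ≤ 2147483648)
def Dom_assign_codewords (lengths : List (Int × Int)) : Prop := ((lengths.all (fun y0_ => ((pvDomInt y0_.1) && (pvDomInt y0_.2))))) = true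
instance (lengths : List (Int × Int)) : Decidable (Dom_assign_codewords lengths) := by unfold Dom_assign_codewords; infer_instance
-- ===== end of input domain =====

-- B replaces A's stateful shift-and-increment counter scan by a stateless closed-form
-- value per symbol (alternative decomposition, same output proved below).

-- shared helper: Python's format(c, '0{w}b'); exact for 0 ≤ c (always the case under Pre_)
def pvBinFmt (c w : Int) : String :=
  let ds := Nat.toDigits 2 c.toNat
  String.ofList (List.replicate (w.toNat - ds.length) '0' ++ ds)

-- ===== PORT A =====
def assign_codewords (lengths : List (Int × Int)) : List (Int × String) :=
  let sorted_lengths := PySem.List.sorted lengths (fun x => x.2) false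
  let st := sorted_lengths.foldl
    (fun (acc : PySem.Dict Int String × Int × Int) p =>
      -- C << (l_i - l_prev) ported as C * 2 ^ (l_i - l_prev).toNat (shift amount ≥ 0 here)
      let C := if p.2 > acc.2.2 then acc.2.1 * 2 ^ (p.2 - acc.2.2).toNat else acc.2.1
      (acc.1.insert p.1 (pvBinFmt C p.2), C + 1, p.2))
    (PySem.Dict.empty, 0, 0)
  st.1.items

-- ===== PORT B =====
def assign_codewords_alt (lengths : List (Int × Int)) : List (Int × String) :=
  let srt := PySem.List.sorted lengths (fun x => x.2) false
  ((PySem.List.enumerate srt).foldl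
    (fun (d : PySem.Dict Int String) ip =>
      let l := ip.2.2
      -- 1 << (l - m) ported as 2 ^ (l - m).toNat (shift amount ≥ 0 under the filter)
      let value := ((lengths.filter (fun p => p.2 < l)).map (fun p => (2:Int) ^ (l - p.2).toNat)).sum
                   + ip.1 - ((lengths.filter (fun p => p.2 < l)).length : Int)
      d.insert ip.2.1 (pvBinFmt value l))
    PySem.Dict.empty).items

-- ===== PRECONDITION & SPEC =====
-- Pre_ excludes a negative codeword length anywhere in the input: there Python A raises
-- ValueError (format spec '0-kb'), and B raises too (negative shift / format).
def Pre_assign_codewords (lengths : List (Int × Int)) : Prop :=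
  ∀ p ∈ lengths, 0 ≤ p.2
instance (lengths : List (Int × Int)) : Decidable (Pre_assign_codewords lengths) := by
  unfold Pre_assign_codewords; infer_instance

def pvWitness_assign_codewords : (List (Int × Int)) := [(0, 1), (1, 2), (2, 2)]

def Spec_assign_codewords (lengths : List (Int × Int)) (out : List (Int × String)) : Prop := out = assign_codewords_alt lengths
instance (lengths : List (Int × Int)) (out : List (Int × String)) : Decidable (Spec_assign_codewords lengths out) := by unfold Spec_assign_codewords; infer_instance

-- ===== CLAIM (what is proved, stated in full; the proofs are below) =====
def Claim_equal_assign_codewords : Prop := ∀ (lengths : List (Int × Int)), Dom_assign_codewords lengths → Pre_assign_codewords lengths → Spec_assign_codewords lengths (assign_codewords lengths)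

-- ===== LEMMAS AND PROOFS =====

-- A's loop body, named (definitionally the lambda in the port of A)
def pvAstep (acc : PySem.Dict Int String × Int × Int) (p : Int × Int) :
    PySem.Dict Int String × Int × Int :=
  let C := if p.2 > acc.2.2 then acc.2.1 * 2 ^ (p.2 - acc.2.2).toNat else acc.2.1
  (acc.1.insert p.1 (pvBinFmt C p.2), C + 1, p.2)

-- Σ_{p ∈ L} 2^(l - p.2)   (A's counter, in closed form)
def pvSumPow (L : List (Int × Int)) (l : Int) : Int :=
  (L.map (fun p => (2:Int) ^ (l - p.2).toNat)).sum

-- the two sums of B, named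
def pvBase (L : List (Int × Int)) (l : Int) : Int :=
  ((L.filter (fun p => p.2 < l)).map (fun p => (2:Int) ^ (l - p.2).toNat)).sum
def pvCnt (L : List (Int × Int)) (l : Int) : Int :=
  ((L.filter (fun p => p.2 < l)).length : Int)

theorem pvShiftEq (C lp k : Int) (h : lp ≤ k) :
    (if k > lp then C * 2 ^ (k - lp).toNat else C) = C * 2 ^ (k - lp).toNat := by
  rcases eq_or_lt_of_le h with he | hl
  · rw [← he]; simp
  · rw [if_pos hl]

theorem pvSumPow_shift (done : List (Int × Int)) (lp l : Int)
    (hle : ∀ p ∈ done, p.2 ≤ lp) (h : lp ≤ l) :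
    pvSumPow done lp * 2 ^ (l - lp).toNat = pvSumPow done l := by
  induction done with
  | nil => simp [pvSumPow]
  | cons q t ih =>
    have hq := hle q (List.mem_cons_self ..)
    have ht := ih (fun p hp => hle p (List.mem_cons_of_mem _ hp))
    simp only [pvSumPow, List.map_cons, List.sum_cons] at ht ⊢
    rw [add_mul, ht, ← pow_add]
    congr 2
    omega

theorem pvSumPow_split (done : List (Int × Int)) (l : Int)
    (hle : ∀ p ∈ done, p.2 ≤ l) :
    pvSumPow done l = pvBase done l + ((done.length : Int) - pvCnt done l) := by
  induction done with
  | nil => simp [pvSumPow, pvBase, pvCnt]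
  | cons q t ih =>
    have hq := hle q (List.mem_cons_self ..)
    have ht := ih (fun p hp => hle p (List.mem_cons_of_mem _ hp))
    by_cases hlt : q.2 < l
    · simp only [pvSumPow, pvBase, pvCnt, List.map_cons, List.sum_cons, List.filter_cons,
        decide_eq_true_eq, if_pos hlt, List.length_cons] at ht ⊢
      push_cast
      omega
    · have he : q.2 = l := le_antisymm hq (not_lt.mp hlt)
      simp only [pvSumPow, pvBase, pvCnt, List.map_cons, List.sum_cons, List.filter_cons,
        decide_eq_true_eq, if_neg hlt, List.length_cons] at ht ⊢
      rw [he]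
      simp only [sub_self, Int.toNat_zero, pow_zero]
      push_cast
      omega

theorem pvBase_append_ge (done rest : List (Int × Int)) (l : Int)
    (hge : ∀ p ∈ rest, l ≤ p.2) :
    pvBase (done ++ rest) l = pvBase done l ∧ pvCnt (done ++ rest) l = pvCnt done l := by
  have hnil : rest.filter (fun p => decide (p.2 < l)) = [] := by
    rw [List.filter_eq_nil_iff]
    intro p hp
    simpa using not_lt.mpr (hge p hp)
  constructor <;> simp [pvBase, pvCnt, List.filter_append, hnil]

theorem pvSumPow_append_self (done : List (Int × Int)) (q : Int × Int) :
    pvSumPow done q.2 + 1 = pvSumPow (done ++ [q]) q.2 := by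
  simp [pvSumPow]

-- the main loop correspondence: A's scan over the remaining sorted symbols equals
-- B's enumerate fold, given A's counter is the closed-form sum over the processed prefix
theorem pvGo (rest : List (Int × Int)) : ∀ (done : List (Int × Int))
    (d : PySem.Dict Int String) (lp : Int),
    (∀ p ∈ done, p.2 ≤ lp) →
    (∀ p ∈ rest, lp ≤ p.2) →
    rest.Pairwise (fun a b => a.2 ≤ b.2) →
    (rest.foldl pvAstep (d, pvSumPow done lp, lp)).1
      = (PySem.List.enumerate rest (done.length : Int)).foldl
          (fun (d : PySem.Dict Int String) ip =>
            d.insert ip.2.1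
              (pvBinFmt (pvBase (done ++ rest) ip.2.2 + ip.1 - pvCnt (done ++ rest) ip.2.2)
                ip.2.2)) d := by
  induction rest with
  | nil => intro done d lp _ _ _; simp [PySem.List.enumerate]
  | cons q rest ih =>
    intro done d lp hdone hge hsort
    have hlpq : lp ≤ q.2 := hge q (List.mem_cons_self ..)
    have hqrest : ∀ p ∈ rest, q.2 ≤ p.2 := fun p hp => (List.pairwise_cons.mp hsort).1 p hp
    have hCq : (if q.2 > lp then pvSumPow done lp * 2 ^ (q.2 - lp).toNat else pvSumPow done lp)
        = pvSumPow done q.2 := by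
      rw [pvShiftEq _ _ _ hlpq, pvSumPow_shift done lp q.2 hdone hlpq]
    have hrestrict := pvBase_append_ge done (q :: rest) q.2
      (by intro p hp; rcases List.mem_cons.mp hp with rfl | hp; · exact le_refl _
          · exact hqrest p hp)
    have hval : pvSumPow done q.2
        = pvBase (done ++ q :: rest) q.2 + (done.length : Int) - pvCnt (done ++ q :: rest) q.2 := by
      rw [hrestrict.1, hrestrict.2, pvSumPow_split done q.2 (fun p hp => le_trans (hdone p hp) hlpq)]
      ring
    have hstep : pvAstep (d, pvSumPow done lp, lp) q
        = (d.insert q.1 (pvBinFmt (pvSumPow done q.2) q.2), pvSumPow done q.2 + 1, q.2) := by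
      simp only [pvAstep, hCq]
    rw [List.foldl_cons, hstep, PySem.List.enumerate_cons, List.foldl_cons,
      pvSumPow_append_self done q]
    have hih := ih (done ++ [q])
      (d.insert q.1 (pvBinFmt (pvSumPow done q.2) q.2)) q.2
      (by intro p hp
          rcases List.mem_append.mp hp with hp | hp
          · exact le_trans (hdone p hp) hlpq
          · simp only [List.mem_singleton] at hp; rw [hp])
      hqrest (List.pairwise_cons.mp hsort).2
    have hlen : ((done ++ [q]).length : Int) = (done.length : Int) + 1 := by
      simp
    rw [hlen] at hih
    have happ : (done ++ [q]) ++ rest = done ++ q :: rest := by simp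
    rw [happ] at hih
    rw [hih, hval]

-- ===== VERDICT (by name: the statement is the Claim_ definition above) =====
theorem assign_codewords_spec : Claim_equal_assign_codewords := by
  unfold Claim_equal_assign_codewords
  intro lengths _ hpre
  unfold Spec_assign_codewords
  simp only [assign_codewords, assign_codewords_alt]
  have hperm : (PySem.List.sorted lengths (fun x => x.2) false).Perm lengths :=
    PySem.List.sorted_perm lengths (fun x => x.2) false
  -- B's sums over the original list equal the same sums over the sorted list
  have hbase : ∀ l : Int, pvBase lengths l = pvBase (PySem.List.sorted lengths (fun x => x.2) false) l := by
    intro l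
    exact ((hperm.filter (fun p => decide (p.2 < l))).map
      (fun p => (2:Int) ^ (l - p.2).toNat)).sum_eq.symm
  have hcnt : ∀ l : Int, pvCnt lengths l = pvCnt (PySem.List.sorted lengths (fun x => x.2) false) l := by
    intro l
    unfold pvCnt
    rw [(hperm.filter (fun p => decide (p.2 < l))).length_eq]
  have hmain := pvGo (PySem.List.sorted lengths (fun x => x.2) false) [] PySem.Dict.empty 0
    (by intro p hp; simp at hp)
    (by intro p hp
        exact hpre p ((PySem.List.mem_sorted _ _ _ _).mp hp))
    (PySem.List.sorted_pairwise lengths (fun x => x.2))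
  simp only [List.nil_append, List.length_nil, Nat.cast_zero] at hmain
  rw [show pvSumPow [] 0 = (0 : Int) from by simp [pvSumPow]] at hmain
  congr 1
  rw [show (fun (acc : PySem.Dict Int String × Int × Int) (p : Int × Int) =>
      let C := if p.2 > acc.2.2 then acc.2.1 * 2 ^ (p.2 - acc.2.2).toNat else acc.2.1
      (acc.1.insert p.1 (pvBinFmt C p.2), C + 1, p.2)) = pvAstep from rfl, hmain]
  apply PySem.List.foldl_congr_mem
  intro acc ip _
  show acc.insert ip.2.1 (pvBinFmt (pvBase _ ip.2.2 + ip.1 - pvCnt _ ip.2.2) ip.2.2)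
      = acc.insert ip.2.1 (pvBinFmt (pvBase lengths ip.2.2 + ip.1 - pvCnt lengths ip.2.2) ip.2.2)
  rw [hbase ip.2.2, hcnt ip.2.2]
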